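-- pv_equiv track=rewrite | github.com/Pavankalyan0105/CP | APril Long/dice.py | solve
-- ===== SOURCE A (Python) =====
-- li = [0 , 20 , 36 , 51 , 60]
--
-- re = {1:16 , 2:12 , 3:11 , 0:5}
--
-- def solve(N):
--     base_sum = li[4]
--     if N<=4: return li[N]
--
--
--     sum = base_sum
--     r = N%4
--
--     while r>0: sum-=re[r]; r-=1;
--
--     sum+=(((N//4)-1)*44)
--
--     return sum
-- ===== SOURCE B (Python) =====
-- li = [0, 20, 36, 51, 60]
--
-- _cum = [0, 16, 28, 39]  # cumulative prefix sums of re[1], re[2], re[3]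
--
-- def solve(N):
--     if N <= 4:
--         return li[N]
--     return 60 - _cum[N % 4] + (N // 4 - 1) * 44
-- ===== Notes on version B (the rewrite author's own statement) =====
-- stated objective: simpler
-- what changed: Replaced the while loop that repeatedly subtracts dictionary entries re[r] with a closed-form expression using a hardcoded prefix-sum table indexed by N % 4, so B has no loop and no dict.
import Mathlib
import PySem

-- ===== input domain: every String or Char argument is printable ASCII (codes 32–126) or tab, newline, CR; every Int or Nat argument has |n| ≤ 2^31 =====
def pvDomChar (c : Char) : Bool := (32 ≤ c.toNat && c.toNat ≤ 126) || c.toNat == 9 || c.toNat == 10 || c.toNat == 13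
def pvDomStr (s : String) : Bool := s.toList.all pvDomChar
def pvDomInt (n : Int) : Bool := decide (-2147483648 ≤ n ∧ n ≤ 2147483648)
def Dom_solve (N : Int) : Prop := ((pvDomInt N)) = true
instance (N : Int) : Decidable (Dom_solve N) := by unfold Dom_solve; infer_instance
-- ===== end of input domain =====

-- B replaces A's while loop over the dict `re` with a loop-free closed form using a prefix-sum table (objective: simpler).

-- ===== PORT A =====
def solveLi : List Int := [0, 20, 36, 51, 60]

def solveRe : PySem.Dict Int Int := PySem.Dict.ofList [(1, 16), (2, 12), (3, 11), (0, 5)]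

-- the while loop: r counts down from N%4; each step subtracts re[r]
def solveLoop : Nat → Int → Int
  | 0, s => s
  | n + 1, s => solveLoop n (s - (PySem.Dict.get? solveRe ((n : Int) + 1)).getD 0)

def solve (N : Int) : Int :=
  let baseSum := (PySem.List.pyGet? solveLi 4).getD 0
  if N ≤ 4 then (PySem.List.pyGet? solveLi N).getD 0
  else
    let sum := solveLoop (PySem.Int.mod N 4).toNat baseSum
    sum + (PySem.Int.floordiv N 4 - 1) * 44

-- ===== PORT B =====
def solveCum : List Int := [0, 16, 28, 39]

def solve_alt (N : Int) : Int :=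
  if N ≤ 4 then (PySem.List.pyGet? solveLi N).getD 0
  else 60 - (PySem.List.pyGet? solveCum (PySem.Int.mod N 4)).getD 0
         + (PySem.Int.floordiv N 4 - 1) * 44

-- ===== PRECONDITION & SPEC =====
-- A raises IndexError (li[N] out of range) for N ≤ -6; those inputs are excluded.
def Pre_solve (N : Int) : Prop := -5 ≤ N
instance (N : Int) : Decidable (Pre_solve N) := by unfold Pre_solve; infer_instance

def pvWitness_solve : Int := 7

def Spec_solve (N : Int) (out : Int) : Prop := out = solve_alt N
instance (N : Int) (out : Int) : Decidable (Spec_solve N out) := by unfold Spec_solve; infer_instance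

-- ===== CLAIM (what is proved, stated in full; the proofs are below) =====
def Claim_equal_solve : Prop := ∀ (N : Int), Dom_solve N → Pre_solve N → Spec_solve N (solve N)

-- ===== LEMMAS AND PROOFS =====

-- the loop result equals 60 minus the prefix-sum table entry, for r = N%4 ∈ [0,3]
theorem solveLoop_eq (r : Int) (h0 : 0 ≤ r) (h4 : r < 4) :
    solveLoop r.toNat 60 = 60 - (PySem.List.pyGet? solveCum r).getD 0 := by
  interval_cases r <;> decide

-- ===== VERDICT (by name: the statement is the Claim_ definition above) =====
theorem solve_spec : Claim_equal_solve := by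
  intro N _ hpre
  unfold Spec_solve solve solve_alt
  by_cases h : N ≤ 4
  · simp only [if_pos h]
  · simp only [if_neg h]
    have h0 := PySem.Int.mod_nonneg N (b := 4) (by norm_num)
    have h4 := PySem.Int.mod_lt N (b := 4) (by norm_num)
    have hb : (PySem.List.pyGet? solveLi 4).getD 0 = 60 := by decide
    rw [hb, solveLoop_eq _ h0 h4]
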